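-- pv_equiv track=rewrite | github.com/theilmbh/NeuralTDA | neuraltda/topology3.py | get_unit_spike_times
-- ===== SOURCE A (Python) =====
-- from itertools import repeat, combinations, groupby
--
-- def spike_id(spike):
--     return spike[1]
--
-- def get_unit_spike_times(spikes):
--     sorted_spikes = sorted(spikes, key=spike_id)
--     spiketimes = []
--     units = []
--     for k, g in groupby(sorted_spikes, spike_id):
--         unit_spiketimes = [x[0] for x in g]
--         spiketimes.append(unit_spiketimes)
--         units.append(k)
--     return (units, spiketimes)
-- ===== SOURCE B (Python) =====
-- def get_unit_spike_times(spikes):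
--     groups = {}
--     for t, u in spikes:
--         groups.setdefault(u, []).append(t)
--     units = sorted(groups)
--     return (units, [groups[u] for u in units])
-- ===== Notes on version B (the rewrite author's own statement) =====
-- stated objective: faster
-- what changed: B replaces sort-all-spikes-then-itertools.groupby with one dict-grouping pass in input order followed by sorting only the unique unit keys.
import Mathlib
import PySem

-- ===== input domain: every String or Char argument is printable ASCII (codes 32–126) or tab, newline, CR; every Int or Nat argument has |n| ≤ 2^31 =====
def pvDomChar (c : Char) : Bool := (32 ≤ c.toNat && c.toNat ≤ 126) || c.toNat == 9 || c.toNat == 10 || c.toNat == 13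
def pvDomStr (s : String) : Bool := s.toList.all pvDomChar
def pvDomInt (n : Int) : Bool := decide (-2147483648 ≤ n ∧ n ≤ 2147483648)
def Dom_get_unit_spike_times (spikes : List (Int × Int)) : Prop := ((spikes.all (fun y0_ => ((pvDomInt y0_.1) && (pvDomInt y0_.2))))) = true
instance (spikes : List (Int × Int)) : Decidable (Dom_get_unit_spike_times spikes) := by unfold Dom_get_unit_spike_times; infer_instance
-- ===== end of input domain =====

-- B replaces A's sort-all-spikes-then-groupby with one dict-grouping pass in input order
-- followed by sorting only the unique unit keys (objective: faster).

-- ===== PORT A =====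
def spike_id (spike : Int × Int) : Int := spike.2

-- the 'for k, g in groupby(sorted_spikes, spike_id)' loop: consecutive runs of equal key
def pvGroupLoop : List (Int × Int) → List Int × List (List Int)
  | [] => ([], [])
  | x :: xs =>
    let g := x :: xs.takeWhile (fun y => spike_id y == spike_id x)
    let rest := xs.dropWhile (fun y => spike_id y == spike_id x)
    let p := pvGroupLoop rest
    (spike_id x :: p.1, g.map (fun y => y.1) :: p.2)
  termination_by s => s.length
  decreasing_by
    have := List.length_dropWhile_le (fun y => spike_id y == spike_id x) xs
    simpa using Nat.lt_succ_of_le this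

def get_unit_spike_times (spikes : List (Int × Int)) : List Int × List (List Int) :=
  let sorted_spikes := PySem.List.sorted spikes spike_id
  pvGroupLoop sorted_spikes

-- ===== PORT B =====
def get_unit_spike_times_alt (spikes : List (Int × Int)) : List Int × List (List Int) :=
  let groups := spikes.foldl (fun d p => d.modify p.2 [] (fun l => l ++ [p.1])) PySem.Dict.empty
  let units := PySem.List.sorted groups.keys (fun x => x)
  (units, units.map (fun u => groups.getD u []))  -- groups[u]: u ∈ keys, so getD never uses the default

-- ===== PRECONDITION & SPEC =====
def Spec_get_unit_spike_times (spikes : List (Int × Int)) (out : List Int × List (List Int)) : Prop := out = get_unit_spike_times_alt spikes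
instance (spikes : List (Int × Int)) (out : List Int × List (List Int)) : Decidable (Spec_get_unit_spike_times spikes out) := by unfold Spec_get_unit_spike_times; infer_instance

-- ===== CLAIM (what is proved, stated in full; the proofs are below) =====
def Claim_equal_get_unit_spike_times : Prop := ∀ (spikes : List (Int × Int)), Dom_get_unit_spike_times spikes → Spec_get_unit_spike_times spikes (get_unit_spike_times spikes)

-- ===== LEMMAS AND PROOFS =====

-- the unit keys produced by the groupby loop
def pvKeys : List (Int × Int) → List Int
  | [] => []
  | x :: xs => x.2 :: pvKeys (xs.dropWhile (fun y => y.2 == x.2))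
  termination_by s => s.length
  decreasing_by
    have := List.length_dropWhile_le (fun y => y.2 == x.2) xs
    simpa using Nat.lt_succ_of_le this

-- pvGroupLoop with the key function inlined (spike_id y = y.2), for induction
def pvGroupLoopN : List (Int × Int) → List Int × List (List Int)
  | [] => ([], [])
  | x :: xs =>
    let g := x :: xs.takeWhile (fun y => y.2 == x.2)
    let rest := xs.dropWhile (fun y => y.2 == x.2)
    let p := pvGroupLoopN rest
    (x.2 :: p.1, g.map (fun y => y.1) :: p.2)
  termination_by s => s.length
  decreasing_by
    have := List.length_dropWhile_le (fun y => y.2 == x.2) xs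
    simpa using Nat.lt_succ_of_le this

theorem pvGroupLoop_eq_N (s : List (Int × Int)) : pvGroupLoop s = pvGroupLoopN s := by
  induction s using pvGroupLoop.induct with
  | case1 => rw [pvGroupLoop, pvGroupLoopN]
  | case2 x xs _rest ih =>
    rw [pvGroupLoop, pvGroupLoopN]
    simp only [spike_id]
    have ih' : pvGroupLoop (List.dropWhile (fun y => y.2 == x.2) xs)
        = pvGroupLoopN (List.dropWhile (fun y => y.2 == x.2) xs) := ih
    rw [ih']

theorem mem_pvKeys (s : List (Int × Int)) (u : Int) : u ∈ pvKeys s ↔ u ∈ s.map (fun y => y.2) := by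
  induction s using pvKeys.induct with
  | case1 => simp [pvKeys]
  | case2 x xs ih =>
    rw [pvKeys]
    constructor
    · rintro h
      rcases List.mem_cons.mp h with h | h
      · simp [h]
      · have := (ih).mp h
        simp only [List.mem_map] at this ⊢
        obtain ⟨y, hy, hyu⟩ := this
        exact ⟨y, List.mem_cons_of_mem _ ((xs.dropWhile_sublist _).mem hy), hyu⟩
    · intro h
      simp only [List.mem_map, List.mem_cons] at h
      obtain ⟨y, hy | hy, hyu⟩ := h
      · subst hy; subst hyu; exact List.mem_cons_self ..
      · have hmem : y ∈ xs.takeWhile (fun y => y.2 == x.2) ++ xs.dropWhile (fun y => y.2 == x.2) := by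
          rw [List.takeWhile_append_dropWhile]; exact hy
        rcases List.mem_append.mp hmem with h1 | h2
        · have := List.mem_takeWhile_imp h1
          simp at this
          subst hyu
          exact List.mem_cons.mpr (Or.inl (by omega))
        · right
          exact ih.mpr (List.mem_map.mpr ⟨y, h2, hyu⟩)

theorem drop_gt (x : Int × Int) (xs : List (Int × Int))
    (h : (x :: xs).Pairwise (fun a b => a.2 ≤ b.2)) :
    ∀ y ∈ xs.dropWhile (fun y => y.2 == x.2), x.2 < y.2 := by
  intro y hy
  rcases hd : xs.dropWhile (fun y => y.2 == x.2) with _ | ⟨z, t⟩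
  · simp [hd] at hy
  · have hz : (z.2 == x.2) = false := by
      have h0 := List.head?_dropWhile_not (fun y => y.2 == x.2) xs
      rw [hd] at h0; exact h0
    have hzne : z.2 ≠ x.2 := by simpa using hz
    have hzx : x.2 ≤ z.2 := by
      have hzxs : z ∈ xs := (xs.dropWhile_sublist _).mem (by rw [hd]; exact List.mem_cons_self ..)
      exact (List.pairwise_cons.mp h).1 z hzxs
    have hlt : x.2 < z.2 := lt_of_le_of_ne hzx (Ne.symm hzne)
    have hpw : (z :: t).Pairwise (fun a b => a.2 ≤ b.2) := by
      have h2 := (List.pairwise_cons.mp h).2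
      have h3 := List.Pairwise.sublist (xs.dropWhile_sublist (fun y => y.2 == x.2)) h2
      rwa [hd] at h3
    rw [hd] at hy
    rcases List.mem_cons.mp hy with rfl | hyt
    · exact hlt
    · exact lt_of_lt_of_le hlt ((List.pairwise_cons.mp hpw).1 y hyt)

theorem pvKeys_lt (s : List (Int × Int)) (h : s.Pairwise (fun a b => a.2 ≤ b.2)) :
    (pvKeys s).Pairwise (· < ·) := by
  induction s using pvKeys.induct with
  | case1 => simp [pvKeys]
  | case2 x xs ih =>
    rw [pvKeys]
    have hrest : (xs.dropWhile (fun y => y.2 == x.2)).Pairwise (fun a b => a.2 ≤ b.2) :=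
      List.Pairwise.sublist (xs.dropWhile_sublist _) (List.pairwise_cons.mp h).2
    refine List.pairwise_cons.mpr ⟨?_, ih hrest⟩
    intro u hu
    obtain ⟨y, hy, rfl⟩ := List.mem_map.mp ((mem_pvKeys _ _).mp hu)
    exact drop_gt x xs h y hy

theorem groupLoop_eq (s : List (Int × Int)) (h : s.Pairwise (fun a b => a.2 ≤ b.2)) :
    pvGroupLoopN s = (pvKeys s, (pvKeys s).map (fun u => (s.filter (fun y => y.2 == u)).map (fun y => y.1))) := by
  induction s using pvGroupLoopN.induct with
  | case1 => simp [pvGroupLoopN, pvKeys]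
  | case2 x xs _rest ih =>
    have hxs := (List.pairwise_cons.mp h).2
    have hrest : (xs.dropWhile (fun y => y.2 == x.2)).Pairwise (fun a b => a.2 ≤ b.2) :=
      List.Pairwise.sublist (xs.dropWhile_sublist _) hxs
    rw [pvGroupLoopN, pvKeys]
    have ih' : pvGroupLoopN (List.dropWhile (fun y => y.2 == x.2) xs)
        = (pvKeys (List.dropWhile (fun y => y.2 == x.2) xs),
           List.map (fun u => List.map (fun y => y.1) (List.filter (fun y => y.2 == u) (List.dropWhile (fun y => y.2 == x.2) xs))) (pvKeys (List.dropWhile (fun y => y.2 == x.2) xs))) := ih hrest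
    rw [ih']
    have hgt := drop_gt x xs h
    have hsplit : xs = xs.takeWhile (fun y => y.2 == x.2) ++ xs.dropWhile (fun y => y.2 == x.2) :=
      (List.takeWhile_append_dropWhile ..).symm
    refine Prod.ext rfl ?_
    simp only [List.map_cons]
    congr 1
    · -- head group: (x :: xs).filter (·.2 == x.2) = x :: takeWhile, mapped
      have hfilt : (x :: xs).filter (fun y => y.2 == x.2) = x :: xs.takeWhile (fun y => y.2 == x.2) := by
        rw [List.filter_cons_of_pos (by simp)]
        congr 1
        conv_lhs => rw [hsplit]
        rw [List.filter_append]
        have h1 : (xs.takeWhile (fun y => y.2 == x.2)).filter (fun y => y.2 == x.2)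
            = xs.takeWhile (fun y => y.2 == x.2) :=
          List.filter_eq_self.mpr (fun a ha => List.mem_takeWhile_imp (p := fun (y : Int × Int) => y.2 == x.2) ha)
        have h2 : (xs.dropWhile (fun y => y.2 == x.2)).filter (fun y => y.2 == x.2) = [] := by
          apply List.filter_eq_nil_iff.mpr
          intro a ha
          have := hgt a ha
          simp
          omega
        rw [h1, h2, List.append_nil]
      rw [hfilt, List.map_cons]
    · -- tail groups: for every later unit u, the filter over s equals the filter over the rest
      apply List.map_congr_left
      intro u hu
      obtain ⟨y, hy, rfl⟩ := List.mem_map.mp ((mem_pvKeys _ _).mp hu)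
      have hult : x.2 < y.2 := drop_gt x xs h y hy
      have hfx : (x :: xs).filter (fun z => z.2 == y.2)
          = (xs.dropWhile (fun z => z.2 == x.2)).filter (fun z => z.2 == y.2) := by
        rw [List.filter_cons_of_neg (by simp; omega)]
        conv_lhs => rw [hsplit]
        rw [List.filter_append]
        have h1 : (xs.takeWhile (fun z => z.2 == x.2)).filter (fun z => z.2 == y.2) = [] := by
          apply List.filter_eq_nil_iff.mpr
          intro a ha
          have := List.mem_takeWhile_imp ha
          simp at this ⊢
          omega
        rw [h1, List.nil_append]
      rw [hfx]

theorem pairwise_insertBy (x : Int × Int) (ys : List (Int × Int))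
    (h : ys.Pairwise (fun a b => a.2 ≤ b.2)) :
    (PySem.List.insertBy (fun a b => decide (a.2 < b.2)) x ys).Pairwise (fun a b => a.2 ≤ b.2) := by
  induction ys with
  | nil => simp [PySem.List.insertBy]
  | cons y ys ih =>
    rw [PySem.List.insertBy]
    obtain ⟨hy, hys⟩ := List.pairwise_cons.mp h
    by_cases hlt : x.2 < y.2
    · simp only [decide_eq_true_eq, hlt, if_pos]
      exact List.pairwise_cons.mpr ⟨fun z hz => by
        rcases List.mem_cons.mp hz with rfl | hz
        · exact le_of_lt hlt
        · exact le_trans (le_of_lt hlt) (hy z hz), h⟩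
    · simp only [decide_eq_true_eq, hlt, if_neg, not_false_iff]
      refine List.pairwise_cons.mpr ⟨?_, ih hys⟩
      intro z hz
      rcases (PySem.List.mem_insertBy _ x z ys).mp hz with rfl | hz
      · omega
      · exact hy z hz

-- stability of the insertion step: equal-key elements keep their relative order
theorem filter_insertBy (u : Int) (x : Int × Int) (ys : List (Int × Int))
    (h : ys.Pairwise (fun a b => a.2 ≤ b.2)) :
    (PySem.List.insertBy (fun a b => decide (a.2 < b.2)) x ys).filter (fun y => y.2 == u)
      = if x.2 = u then ys.filter (fun y => y.2 == u) ++ [x] else ys.filter (fun y => y.2 == u) := by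
  induction ys with
  | nil => rw [PySem.List.insertBy]; by_cases hxu : x.2 = u <;> simp [hxu]
  | cons y ys ih =>
    rw [PySem.List.insertBy]
    obtain ⟨hy, hys⟩ := List.pairwise_cons.mp h
    by_cases hlt : x.2 < y.2
    · simp only [decide_eq_true_eq, hlt, if_pos]
      by_cases hxu : x.2 = u
      · have hnil : (y :: ys).filter (fun y => y.2 == u) = [] := by
          apply List.filter_eq_nil_iff.mpr
          intro a ha
          rcases List.mem_cons.mp ha with rfl | ha
          · simp; omega
          · have := hy a ha; simp; omega
        rw [List.filter_cons_of_pos (by simp [hxu]), hnil, if_pos hxu]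
        simp
      · rw [List.filter_cons_of_neg (by simp [hxu]), if_neg hxu]
    · simp only [decide_eq_true_eq, hlt, if_neg, not_false_iff]
      by_cases hyu : y.2 = u
      · rw [List.filter_cons_of_pos (by simp [hyu]), ih hys,
          List.filter_cons_of_pos (by simp [hyu])]
        by_cases hxu : x.2 = u <;> simp [hxu]
      · rw [List.filter_cons_of_neg (by simp [hyu]), ih hys,
          List.filter_cons_of_neg (by simp [hyu])]

theorem filter_foldl_insertBy (u : Int) (l : List (Int × Int)) :
    ∀ acc : List (Int × Int), acc.Pairwise (fun a b => a.2 ≤ b.2) →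
    (l.foldl (fun acc x => PySem.List.insertBy (fun a b => decide (a.2 < b.2)) x acc) acc).filter (fun y => y.2 == u)
      = acc.filter (fun y => y.2 == u) ++ l.filter (fun y => y.2 == u) := by
  induction l with
  | nil => intro acc _; simp
  | cons a l ih =>
    intro acc hacc
    rw [List.foldl_cons, ih _ (pairwise_insertBy a acc hacc), filter_insertBy u a acc hacc]
    by_cases hau : a.2 = u
    · rw [if_pos hau, List.filter_cons_of_pos (by simp [hau])]
      simp
    · rw [if_neg hau, List.filter_cons_of_neg (by simp [hau])]

-- STABILITY: sorting by unit key does not change the input-order list of any one unit's spikes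
theorem sorted_filter (spikes : List (Int × Int)) (u : Int) :
    (PySem.List.sorted spikes spike_id).filter (fun y => y.2 == u) = spikes.filter (fun y => y.2 == u) := by
  rw [PySem.List.sorted_eq_foldl_insertBy]
  have h := filter_foldl_insertBy u spikes [] (List.Pairwise.nil)
  simpa [spike_id] using h

theorem getD_group_aux (u : Int) (l : List (Int × Int)) :
    ∀ d : PySem.Dict Int (List Int),
    (l.foldl (fun d p => d.modify p.2 [] (fun v => v ++ [p.1])) d).getD u []
      = d.getD u [] ++ (l.filter (fun y => y.2 == u)).map (fun y => y.1) := by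
  induction l with
  | nil => intro d; simp
  | cons p l ih =>
    intro d
    rw [List.foldl_cons, ih, PySem.Dict.getD_modify]
    by_cases hpu : u = p.2
    · rw [if_pos hpu, List.filter_cons_of_pos (by simp [hpu]), List.map_cons, hpu]
      simp
    · rw [if_neg hpu, List.filter_cons_of_neg (by simp; omega)]

-- ===== VERDICT (by name: the statement is the Claim_ definition above) =====
theorem get_unit_spike_times_spec : Claim_equal_get_unit_spike_times := by
  intro spikes _
  unfold Spec_get_unit_spike_times get_unit_spike_times get_unit_spike_times_alt
  simp only []
  set S := PySem.List.sorted spikes spike_id with hSdef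
  have hS : S.Pairwise (fun a b => a.2 ≤ b.2) := by
    have := PySem.List.sorted_pairwise spikes spike_id
    simpa only [spike_id] using this
  set d := spikes.foldl (fun d p => d.modify p.2 [] (fun l => l ++ [p.1])) PySem.Dict.empty with hddef
  have hkeys : d.keys = PySem.Set.ofList (spikes.map (fun p => p.2)) := by
    rw [hddef, PySem.Dict.keys_foldl_modify_key (key := fun p : Int × Int => p.2)
      (d0 := ([] : List Int)) (f := fun _ p l => l ++ [p.1]), PySem.Dict.keys_empty,
      PySem.Set.update_nil_left]
  have hKnodup : (pvKeys S).Nodup := (pvKeys_lt S hS).imp (fun h => ne_of_lt h)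
  have hmemK : ∀ a, a ∈ pvKeys S ↔ a ∈ PySem.Set.ofList (spikes.map (fun p => p.2)) := by
    intro a
    rw [mem_pvKeys, PySem.Set.mem_ofList]
    constructor
    · intro h
      obtain ⟨y, hy, rfl⟩ := List.mem_map.mp h
      exact List.mem_map.mpr ⟨y, (PySem.List.mem_sorted ..).mp hy, rfl⟩
    · intro h
      obtain ⟨y, hy, rfl⟩ := List.mem_map.mp h
      exact List.mem_map.mpr ⟨y, (PySem.List.mem_sorted ..).mpr hy, rfl⟩
  have hunits : PySem.List.sorted d.keys (fun x => x) = pvKeys S := by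
    rw [hkeys]
    apply PySem.List.sorted_eq_of_perm_of_pairwise_lt
    · exact (List.perm_ext_iff_of_nodup hKnodup (PySem.Set.nodup_ofList _)).mpr hmemK
    · exact pvKeys_lt S hS
  rw [pvGroupLoop_eq_N, groupLoop_eq S hS, hunits]
  refine Prod.ext rfl ?_
  apply List.map_congr_left
  intro u _
  rw [sorted_filter, getD_group_aux u spikes PySem.Dict.empty]
  simp
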